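-- pv_equiv track=rewrite | github.com/jdposada/slack_app_test | omop_index.py | is_label_paragraph
-- ===== SOURCE A (Python) =====
-- def is_label_paragraph(text: str) -> bool:
--     if len(text) > 40:
--         return False
--     if any(character in text for character in ".:;"):
--         return False
--     words = text.split()
--     if not words:
--         return False
--     return all(word[:1].isupper() for word in words if word[0].isalpha())
-- ===== SOURCE B (Python) =====
-- def is_label_paragraph(text: str) -> bool:
--     if len(text) > 40:
--         return False
--     prev_space = True
--     saw_word = False
--     for c in text:
--         if c in ".:;":
--             return False
--         if prev_space and not c.isspace():
--             if c.isalpha() and not c.isupper():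
--                 return False
--             saw_word = True
--         prev_space = c.isspace()
--     return saw_word
-- ===== Notes on version B (the rewrite author's own statement) =====
-- stated objective: alternative
-- what changed: A's three passes over the text (per-separator substring checks, split() into a word list, then an all() over the words) are replaced by a single left-to-right character scan that tracks a prev_space flag to detect word starts and a saw_word flag, returning early on a separator or a lowercase word-initial letter.
import Mathlib
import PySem

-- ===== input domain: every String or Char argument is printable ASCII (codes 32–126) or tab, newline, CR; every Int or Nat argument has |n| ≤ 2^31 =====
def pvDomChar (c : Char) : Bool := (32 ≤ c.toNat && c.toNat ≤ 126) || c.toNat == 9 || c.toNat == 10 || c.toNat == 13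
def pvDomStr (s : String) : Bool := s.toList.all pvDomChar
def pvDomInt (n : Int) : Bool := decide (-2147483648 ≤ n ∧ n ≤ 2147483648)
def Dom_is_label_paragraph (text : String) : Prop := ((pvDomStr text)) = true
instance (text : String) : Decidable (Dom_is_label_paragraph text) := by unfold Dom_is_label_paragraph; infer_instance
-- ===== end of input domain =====

-- B replaces A's three passes (substring checks, split(), all()) by one left-to-right
-- character scan with prev_space/saw_word flags; objective: alternative (single pass).

-- ===== PORT A =====
-- word[:1].isupper() — Python str.isupper: at least one cased char, and no cased char
-- that is not uppercase (exact here: every cased character of these strings is an ASCII letter)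
def pyStrIsupper (cs : List Char) : Bool :=
  cs.any PySem.Chars.isalpha && cs.all (fun d => !(PySem.Chars.isalpha d && !PySem.Chars.isupper d))

-- the body of A's generator: 'word[:1].isupper() for … if word[0].isalpha()'
-- (words produced by split() are never empty, so the 'none' arm of word[0] is unreachable)
def pyWordOK (w : List Char) : Bool :=
  match PySem.List.pyGet? w 0 with
  | none => true
  | some c => if PySem.Chars.isalpha c then pyStrIsupper (PySem.List.slice w none (some 1)) else true

def is_label_paragraph (text : String) : Bool :=
  if PySem.Str.len text > 40 then false
  else if ['.', ':', ';'].any (fun c => PySem.Chars.isIn [c] text.toList) then false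
  else
    let words := PySem.Chars.split₀ text.toList
    if words.isEmpty then false
    else words.all pyWordOK

-- ===== PORT B =====
-- the for-loop of Source B: state = (prev_space, saw_word), early returns become results
def altScan : List Char → Bool → Bool → Bool
  | [], _, saw => saw
  | c :: rest, prevSpace, saw =>
    if ['.', ':', ';'].contains c then false
    else if prevSpace && !PySem.Chars.isspace c then
      if PySem.Chars.isalpha c && !PySem.Chars.isupper c then false
      else altScan rest false true
    else altScan rest (PySem.Chars.isspace c) saw

def is_label_paragraph_alt (text : String) : Bool :=
  if PySem.Str.len text > 40 then false
  else altScan text.toList true false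

-- ===== PRECONDITION & SPEC =====
def Spec_is_label_paragraph (text : String) (out : Bool) : Prop := out = is_label_paragraph_alt text
instance (text : String) (out : Bool) : Decidable (Spec_is_label_paragraph text out) := by unfold Spec_is_label_paragraph; infer_instance

-- ===== CLAIM (what is proved, stated in full; the proofs are below) =====
def Claim_equal_is_label_paragraph : Prop := ∀ (text : String), Dom_is_label_paragraph text → Spec_is_label_paragraph text (is_label_paragraph text)

-- ===== LEMMAS AND PROOFS =====

-- the non-space predicate by which split() cuts words
def nsp (c : Char) : Bool := !PySem.Chars.isspace c

lemma split0_cons_space {c : Char} (cs : List Char) (hs : PySem.Chars.isspace c = true) :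
    PySem.Chars.split₀ (c :: cs) = PySem.Chars.split₀ cs := by
  simp [PySem.Chars.split₀, PySem.Chars.split₀.go, hs]

lemma split_go_spec (cs : List Char) : ∀ (acc : List (List Char)) (cw : List Char),
    PySem.Chars.split₀.go cs cw acc =
      acc.reverse ++ (if cw.isEmpty then PySem.Chars.split₀ cs
        else (cw.reverse ++ cs.takeWhile nsp) :: PySem.Chars.split₀ (cs.dropWhile nsp)) := by
  induction cs with
  | nil =>
    intro acc cw
    cases cw <;> simp [PySem.Chars.split₀.go, PySem.Chars.split₀]
  | cons c rest ih =>
    intro acc cw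
    by_cases hs : PySem.Chars.isspace c = true
    · cases cw with
      | nil =>
        rw [show PySem.Chars.split₀.go (c :: rest) [] acc = PySem.Chars.split₀.go rest [] acc from by
          simp [PySem.Chars.split₀.go, hs], ih]
        simp [split0_cons_space rest hs, nsp, hs, List.takeWhile, List.dropWhile]
      | cons d t =>
        rw [show PySem.Chars.split₀.go (c :: rest) (d :: t) acc
              = PySem.Chars.split₀.go rest [] ((d :: t).reverse :: acc) from by
          simp [PySem.Chars.split₀.go, hs], ih]
        simp [split0_cons_space rest hs, nsp, hs, List.takeWhile, List.dropWhile]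
    · cases cw with
      | nil =>
        rw [show PySem.Chars.split₀.go (c :: rest) [] acc = PySem.Chars.split₀.go rest [c] acc from by
          simp [PySem.Chars.split₀.go, hs], ih]
        rw [show PySem.Chars.split₀ (c :: rest) = PySem.Chars.split₀.go rest [c] [] from by
          simp [PySem.Chars.split₀, PySem.Chars.split₀.go, hs], ih]
        simp [nsp, hs, List.takeWhile, List.dropWhile]
      | cons d t =>
        rw [show PySem.Chars.split₀.go (c :: rest) (d :: t) acc
              = PySem.Chars.split₀.go rest (c :: d :: t) acc from by
          simp [PySem.Chars.split₀.go, hs], ih]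
        simp [nsp, hs, List.takeWhile, List.dropWhile]

lemma split0_cons_nonspace {c : Char} (cs : List Char) (hs : ¬ PySem.Chars.isspace c = true) :
    PySem.Chars.split₀ (c :: cs) = (c :: cs.takeWhile nsp) :: PySem.Chars.split₀ (cs.dropWhile nsp) := by
  rw [show PySem.Chars.split₀ (c :: cs) = PySem.Chars.split₀.go cs [c] [] from by
    simp [PySem.Chars.split₀, PySem.Chars.split₀.go, hs], split_go_spec]
  simp

-- A's per-word check on a nonempty word only looks at the first character
lemma pyWordOK_cons (c : Char) (t : List Char) :
    pyWordOK (c :: t) = (!PySem.Chars.isalpha c || PySem.Chars.isupper c) := by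
  have hg : PySem.List.pyGet? (c :: t) 0 = some c := by simp [pysem]
  have hsl : PySem.List.slice (c :: t) none (some 1) = [c] := by simp [pysem]
  cases ha : PySem.Chars.isalpha c <;> cases hu : PySem.Chars.isupper c <;>
    simp [pyWordOK, pyStrIsupper, hg, hsl, ha, hu]

-- the two separator tests agree: some separator occurs in cs ↔ some char of cs is a separator
lemma anyBad_eq (cs : List Char) :
    (['.', ':', ';'].any fun c => PySem.Chars.isIn [c] cs) = cs.any (fun c => ['.', ':', ';'].contains c) := by
  rw [Bool.eq_iff_iff]
  simp only [List.any_eq_true, PySem.Chars.isIn_iff_infix, List.singleton_infix_iff,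
    List.contains_eq_mem, decide_eq_true_eq]
  constructor <;> rintro ⟨c, h1, h2⟩ <;> exact ⟨c, h2, h1⟩

-- the scanner mid-text: once a word has been seen (saw = true)
lemma altScan_saw (cs : List Char) :
    (altScan cs true true
      = (!cs.any (fun c => ['.', ':', ';'].contains c) && (PySem.Chars.split₀ cs).all pyWordOK)) ∧
    (altScan cs false true
      = (!cs.any (fun c => ['.', ':', ';'].contains c)
          && (PySem.Chars.split₀ (cs.dropWhile nsp)).all pyWordOK)) := by
  induction cs with
  | nil => simp [altScan, PySem.Chars.split₀, PySem.Chars.split₀.go]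
  | cons c rest ih =>
    by_cases hb : c ∈ (['.', ':', ';'] : List Char)
    · simp only [List.mem_cons, List.not_mem_nil, or_false] at hb
      constructor <;> (obtain h|h|h := hb <;> subst h <;> simp [altScan])
    · obtain ⟨h1, h2, h3⟩ : ¬c = '.' ∧ ¬c = ':' ∧ ¬c = ';' := by simpa using hb
      by_cases hs : PySem.Chars.isspace c = true
      · constructor <;>
          simp [altScan, h1, h2, h3, hs, split0_cons_space rest hs, ih.1, nsp, List.dropWhile]
      · constructor
        · by_cases hk : (PySem.Chars.isalpha c && !PySem.Chars.isupper c) = true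
          · simp [altScan, h1, h2, h3, hs, hk, split0_cons_nonspace rest hs, pyWordOK_cons]
            intro h; simp_all
          · simp [altScan, h1, h2, h3, hs, hk, split0_cons_nonspace rest hs, pyWordOK_cons, ih.2]
            cases hA : PySem.Chars.isalpha c <;> simp_all
        · simp [altScan, h1, h2, h3, hs, ih.2, nsp, List.dropWhile]

-- the scanner from its initial state (prev_space = true, saw_word = false)
lemma altScan_init (cs : List Char) :
    altScan cs true false
      = (!cs.any (fun c => ['.', ':', ';'].contains c)
          && (!(PySem.Chars.split₀ cs).isEmpty && (PySem.Chars.split₀ cs).all pyWordOK)) := by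
  induction cs with
  | nil => simp [altScan, PySem.Chars.split₀, PySem.Chars.split₀.go]
  | cons c rest ih =>
    by_cases hb : c ∈ (['.', ':', ';'] : List Char)
    · simp only [List.mem_cons, List.not_mem_nil, or_false] at hb
      obtain h|h|h := hb <;> subst h <;> simp [altScan]
    · obtain ⟨h1, h2, h3⟩ : ¬c = '.' ∧ ¬c = ':' ∧ ¬c = ';' := by simpa using hb
      by_cases hs : PySem.Chars.isspace c = true
      · simp [altScan, h1, h2, h3, hs, split0_cons_space rest hs, ih]
      · by_cases hk : (PySem.Chars.isalpha c && !PySem.Chars.isupper c) = true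
        · simp [altScan, h1, h2, h3, hs, hk, split0_cons_nonspace rest hs, pyWordOK_cons]
          intro h; simp_all
        · simp [altScan, h1, h2, h3, hs, hk, split0_cons_nonspace rest hs, pyWordOK_cons,
            (altScan_saw rest).2]
          cases hA : PySem.Chars.isalpha c <;> simp_all

-- ===== VERDICT (by name: the statement is the Claim_ definition above) =====
theorem is_label_paragraph_spec : Claim_equal_is_label_paragraph := by
  intro text _
  unfold Spec_is_label_paragraph is_label_paragraph is_label_paragraph_alt
  rw [altScan_init, ← anyBad_eq]
  by_cases hl : PySem.Str.len text > 40
  · rw [if_pos hl, if_pos hl]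
  · rw [if_neg hl, if_neg hl]
    by_cases hany : (['.', ':', ';'].any fun c => PySem.Chars.isIn [c] text.toList) = true
    · simp [hany]
    · by_cases he : (PySem.Chars.split₀ text.toList).isEmpty = true <;> simp [hany, he]
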